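-- pv_equiv track=rewrite | github.com/markyip/SD-Backup-Tool | src/sd_backup_tool/core/file_scanner.py | _get_file_type
-- ===== SOURCE A (Python) =====
-- def _get_file_type(name):
--     """Determine the type of file based on name and extension"""
--     name_lower = name.lower()
--
--     # Check extensions first (more specific)
--     if any(name_lower.endswith(ext) for ext in ['.raw', '.arw', '.cr2', '.nef', '.dng']):
--         return 'raw'
--     elif any(name_lower.endswith(ext) for ext in ['.jpg', '.jpeg', '.png', '.gif', '.bmp', '.tiff', '.tif']):
--         return 'photo'
--     elif any(name_lower.endswith(ext) for ext in ['.mp4', '.mov', '.avi', '.wmv', '.mkv']):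
--         return 'video'
--     # Sony camera files without extension or with unrecognized extension
--     elif name.startswith('DSC'):
--         return 'camera'
--
--     return 'unknown'
-- ===== SOURCE B (Python) =====
-- _EXT_CATEGORY = {
--     '.raw': 'raw', '.arw': 'raw', '.cr2': 'raw', '.nef': 'raw', '.dng': 'raw',
--     '.jpg': 'photo', '.jpeg': 'photo', '.png': 'photo', '.gif': 'photo',
--     '.bmp': 'photo', '.tiff': 'photo', '.tif': 'photo',
--     '.mp4': 'video', '.mov': 'video', '.avi': 'video', '.wmv': 'video', '.mkv': 'video',
-- }
--
--
-- def _get_file_type(name):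
--     """Determine the type of file based on name and extension"""
--     name_lower = name.lower()
--     dot = name_lower.rfind('.')
--     ext = '' if dot == -1 else name_lower[dot:]
--     cat = _EXT_CATEGORY.get(ext)
--     if cat is not None:
--         return cat
--     return 'camera' if name.startswith('DSC') else 'unknown'
-- ===== Notes on version B (the rewrite author's own statement) =====
-- stated objective: simpler
-- what changed: Replaces the three endswith-scan loops with a single extension extraction (suffix from the last dot of the lowercased name) followed by one dict lookup mapping extension to category; the case-sensitive DSC fallback is unchanged.
import Mathlib
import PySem

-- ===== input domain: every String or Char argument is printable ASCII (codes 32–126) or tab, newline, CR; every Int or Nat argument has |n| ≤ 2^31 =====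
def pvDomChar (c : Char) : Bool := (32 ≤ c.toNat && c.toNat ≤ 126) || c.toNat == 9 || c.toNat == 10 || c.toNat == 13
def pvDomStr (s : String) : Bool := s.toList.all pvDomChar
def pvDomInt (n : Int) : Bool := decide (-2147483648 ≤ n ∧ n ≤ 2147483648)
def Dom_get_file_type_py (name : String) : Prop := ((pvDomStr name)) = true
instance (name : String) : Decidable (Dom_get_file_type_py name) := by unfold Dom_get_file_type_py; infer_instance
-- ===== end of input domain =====

-- B replaces A's three endswith-scan loops by extracting the extension once (suffix from the
-- last dot of the lowercased name) and looking it up in a single extension→category dict;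
-- objective: simpler.

-- ===== PORT A =====
def rawExts : List String := [".raw", ".arw", ".cr2", ".nef", ".dng"]
def photoExts : List String := [".jpg", ".jpeg", ".png", ".gif", ".bmp", ".tiff", ".tif"]
def videoExts : List String := [".mp4", ".mov", ".avi", ".wmv", ".mkv"]

def get_file_type_py (name : String) : String :=
  let name_lower := PySem.Str.lower name
  if rawExts.any (fun ext => PySem.Str.endswith name_lower ext) then "raw"
  else if photoExts.any (fun ext => PySem.Str.endswith name_lower ext) then "photo"
  else if videoExts.any (fun ext => PySem.Str.endswith name_lower ext) then "video"
  else if PySem.Str.startswith name "DSC" then "camera"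
  else "unknown"

-- ===== PORT B =====
def extCategory : PySem.Dict String String :=
  ⟨[(".raw", "raw"), (".arw", "raw"), (".cr2", "raw"), (".nef", "raw"), (".dng", "raw"),
   (".jpg", "photo"), (".jpeg", "photo"), (".png", "photo"), (".gif", "photo"),
   (".bmp", "photo"), (".tiff", "photo"), (".tif", "photo"),
   (".mp4", "video"), (".mov", "video"), (".avi", "video"), (".wmv", "video"), (".mkv", "video")]⟩

def get_file_type_py_alt (name : String) : String :=
  let name_lower := PySem.Str.lower name
  let dot := PySem.Str.rfind name_lower "."
  let ext := if dot = -1 then "" else PySem.Str.slice name_lower (some dot) none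
  match PySem.Dict.get? extCategory ext with
  | some cat => cat
  | none => if PySem.Str.startswith name "DSC" then "camera" else "unknown"

-- ===== PRECONDITION & SPEC =====
def Spec_get_file_type_py (name : String) (out : String) : Prop := out = get_file_type_py_alt name
instance (name : String) (out : String) : Decidable (Spec_get_file_type_py name out) := by unfold Spec_get_file_type_py; infer_instance

-- ===== CLAIM (what is proved, stated in full; the proofs are below) =====
def Claim_equal_get_file_type_py : Prop := ∀ (name : String), Dom_get_file_type_py name → Spec_get_file_type_py name (get_file_type_py name)

-- ===== LEMMAS AND PROOFS =====

-- the extension B extracts, at the List Char level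
def extChars (l : List Char) : List Char :=
  if PySem.Chars.rfind l ['.'] = -1 then []
  else PySem.Chars.slice l (some (PySem.Chars.rfind l ['.'])) none

lemma rfind_go_cases (l sub : List Char) (n : Nat) :
    PySem.Chars.rfind.go l sub n = -1 ∨ ∃ k : Nat, PySem.Chars.rfind.go l sub n = (k : Int) := by
  induction n with
  | zero =>
    simp only [PySem.Chars.rfind.go]
    split
    · exact Or.inr ⟨0, rfl⟩
    · exact Or.inl rfl
  | succ n ih =>
    simp only [PySem.Chars.rfind.go]
    split
    · exact Or.inr ⟨n + 1, by push_cast; ring⟩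
    · exact ih

lemma extChars_suffix (l : List Char) : extChars l <:+ l := by
  unfold extChars
  split
  · exact List.nil_suffix
  · next h =>
    rcases rfind_go_cases l ['.'] l.length with h' | ⟨k, hk⟩
    · exact absurd (by rw [PySem.Chars.rfind]; exact h') h
    · have hk' : PySem.Chars.rfind l ['.'] = (k : Int) := by rw [PySem.Chars.rfind]; exact hk
      rw [hk', PySem.Chars.slice, PySem.List.slice_from l (Int.natCast_nonneg k)]
      exact List.drop_suffix _ _

lemma rfind_go_last (l : List Char) (i n : Nat) (hin : i ≤ n)
    (hp : ['.'].isPrefixOf (l.drop i) = true)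
    (hnp : ∀ j : Nat, i < j → j ≤ n → ¬ (['.'].isPrefixOf (l.drop j) = true)) :
    PySem.Chars.rfind.go l ['.'] n = (i : Int) := by
  induction n with
  | zero =>
    have : i = 0 := Nat.le_zero.mp hin
    subst this
    simp only [PySem.Chars.rfind.go]
    simpa using hp
  | succ n ih =>
    rcases Nat.lt_or_ge i (n + 1) with h | h
    · have hfalse := hnp (n + 1) h (le_refl _)
      simp only [PySem.Chars.rfind.go]
      rw [if_neg hfalse]
      exact ih (Nat.lt_succ_iff.mp h) (fun j hj hjn => hnp j hj (Nat.le_succ_of_le hjn))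
    · have : i = n + 1 := le_antisymm hin h
      subst this
      simp only [PySem.Chars.rfind.go]
      rw [if_pos hp]

lemma extChars_of_suffix (l q : List Char) (hdot : '.' ∉ q)
    (h : ('.' :: q) <:+ l) : extChars l = '.' :: q := by
  obtain ⟨pre, hpre⟩ := h
  subst hpre
  have hdropi : (pre ++ '.' :: q).drop pre.length = '.' :: q := by simp
  have hrf : PySem.Chars.rfind (pre ++ '.' :: q) ['.'] = (pre.length : Int) := by
    rw [PySem.Chars.rfind]
    apply rfind_go_last
    · simp
    · rw [hdropi]; simp [List.isPrefixOf]
    · intro j hj hjn hpj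
      obtain ⟨m, hm⟩ := Nat.exists_eq_add_of_lt hj
      subst hm
      have hd2 : (pre ++ '.' :: q).drop (pre.length + m + 1) = q.drop m := by
        rw [show pre.length + m + 1 = pre.length + (m + 1) by ring, List.drop_append]
        simp
      rw [hd2] at hpj
      rw [List.isPrefixOf_iff_prefix] at hpj
      have hmem : ('.' : Char) ∈ q.drop m := hpj.subset (by simp)
      exact hdot (List.mem_of_mem_drop hmem)
  unfold extChars
  rw [hrf]
  rw [if_neg (by omega)]
  rw [PySem.Chars.slice, PySem.List.slice_from _ (Int.natCast_nonneg pre.length)]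
  simp [hdropi]

lemma extChars_eq_iff (l q : List Char) (hdot : '.' ∉ q) :
    extChars l = '.' :: q ↔ ('.' :: q) <:+ l := by
  constructor
  · intro h; rw [← h]; exact extChars_suffix l
  · exact extChars_of_suffix l q hdot

lemma endswith_eq_decide (l q : List Char) (hdot : '.' ∉ q) :
    PySem.Chars.endswith l ('.' :: q) = decide (extChars l = '.' :: q) := by
  by_cases h : extChars l = '.' :: q
  · simp [h, PySem.Chars.endswith_iff, (extChars_eq_iff l q hdot).mp h]
  · simp only [h, decide_false]
    rw [← Bool.not_eq_true]
    rw [PySem.Chars.endswith_iff]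
    exact fun hs => h ((extChars_eq_iff l q hdot).mpr hs)

lemma ext_str_eq (name : String) :
    (if PySem.Str.rfind (PySem.Str.lower name) "." = -1 then ""
     else PySem.Str.slice (PySem.Str.lower name) (some (PySem.Str.rfind (PySem.Str.lower name) ".")) none)
    = String.ofList (extChars (PySem.Chars.lower name.toList)) := by
  have h1 : PySem.Str.rfind (PySem.Str.lower name) "." =
      PySem.Chars.rfind (PySem.Chars.lower name.toList) ['.'] := by
    rw [PySem.Str.rfind_eq, PySem.Str.toList_lower]; rfl
  unfold extChars
  rw [h1]
  by_cases hc : PySem.Chars.rfind (PySem.Chars.lower name.toList) ['.'] = -1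
  · rw [if_pos hc, if_pos hc]
  · rw [if_neg hc, if_neg hc]
    unfold PySem.Str.slice
    rw [PySem.Str.toList_lower]

lemma alt_eq (name : String) :
    get_file_type_py_alt name =
      (match PySem.Dict.get? extCategory (String.ofList (extChars (PySem.Chars.lower name.toList))) with
       | some cat => cat
       | none => if PySem.Str.startswith name "DSC" then "camera" else "unknown") := by
  unfold get_file_type_py_alt
  dsimp only
  rw [ext_str_eq name]

lemma table (x : List Char) (dsc : String) :
    (if x = ".raw".toList ∨ x = ".arw".toList ∨ x = ".cr2".toList ∨ x = ".nef".toList ∨ x = ".dng".toList then "raw"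
     else if x = ".jpg".toList ∨ x = ".jpeg".toList ∨ x = ".png".toList ∨ x = ".gif".toList ∨ x = ".bmp".toList ∨ x = ".tiff".toList ∨ x = ".tif".toList then "photo"
     else if x = ".mp4".toList ∨ x = ".mov".toList ∨ x = ".avi".toList ∨ x = ".wmv".toList ∨ x = ".mkv".toList then "video"
     else dsc)
    = (match PySem.Dict.get? extCategory (String.ofList x) with
       | some cat => cat
       | none => dsc) := by
  by_cases h1 : x = ".raw".toList
  · subst h1; exact rfl
  by_cases h2 : x = ".arw".toList
  · subst h2; exact rfl
  by_cases h3 : x = ".cr2".toList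
  · subst h3; exact rfl
  by_cases h4 : x = ".nef".toList
  · subst h4; exact rfl
  by_cases h5 : x = ".dng".toList
  · subst h5; exact rfl
  by_cases h6 : x = ".jpg".toList
  · subst h6; exact rfl
  by_cases h7 : x = ".jpeg".toList
  · subst h7; exact rfl
  by_cases h8 : x = ".png".toList
  · subst h8; exact rfl
  by_cases h9 : x = ".gif".toList
  · subst h9; exact rfl
  by_cases h10 : x = ".bmp".toList
  · subst h10; exact rfl
  by_cases h11 : x = ".tiff".toList
  · subst h11; exact rfl
  by_cases h12 : x = ".tif".toList
  · subst h12; exact rfl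
  by_cases h13 : x = ".mp4".toList
  · subst h13; exact rfl
  by_cases h14 : x = ".mov".toList
  · subst h14; exact rfl
  by_cases h15 : x = ".avi".toList
  · subst h15; exact rfl
  by_cases h16 : x = ".wmv".toList
  · subst h16; exact rfl
  by_cases h17 : x = ".mkv".toList
  · subst h17; exact rfl
  have b1 : ((".raw" : String) == String.ofList x) = false := beq_eq_false_iff_ne.mpr (fun h => h1 (by have := congrArg String.toList h; simpa using this.symm))
  have b2 : ((".arw" : String) == String.ofList x) = false := beq_eq_false_iff_ne.mpr (fun h => h2 (by have := congrArg String.toList h; simpa using this.symm))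
  have b3 : ((".cr2" : String) == String.ofList x) = false := beq_eq_false_iff_ne.mpr (fun h => h3 (by have := congrArg String.toList h; simpa using this.symm))
  have b4 : ((".nef" : String) == String.ofList x) = false := beq_eq_false_iff_ne.mpr (fun h => h4 (by have := congrArg String.toList h; simpa using this.symm))
  have b5 : ((".dng" : String) == String.ofList x) = false := beq_eq_false_iff_ne.mpr (fun h => h5 (by have := congrArg String.toList h; simpa using this.symm))
  have b6 : ((".jpg" : String) == String.ofList x) = false := beq_eq_false_iff_ne.mpr (fun h => h6 (by have := congrArg String.toList h; simpa using this.symm))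
  have b7 : ((".jpeg" : String) == String.ofList x) = false := beq_eq_false_iff_ne.mpr (fun h => h7 (by have := congrArg String.toList h; simpa using this.symm))
  have b8 : ((".png" : String) == String.ofList x) = false := beq_eq_false_iff_ne.mpr (fun h => h8 (by have := congrArg String.toList h; simpa using this.symm))
  have b9 : ((".gif" : String) == String.ofList x) = false := beq_eq_false_iff_ne.mpr (fun h => h9 (by have := congrArg String.toList h; simpa using this.symm))
  have b10 : ((".bmp" : String) == String.ofList x) = false := beq_eq_false_iff_ne.mpr (fun h => h10 (by have := congrArg String.toList h; simpa using this.symm))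
  have b11 : ((".tiff" : String) == String.ofList x) = false := beq_eq_false_iff_ne.mpr (fun h => h11 (by have := congrArg String.toList h; simpa using this.symm))
  have b12 : ((".tif" : String) == String.ofList x) = false := beq_eq_false_iff_ne.mpr (fun h => h12 (by have := congrArg String.toList h; simpa using this.symm))
  have b13 : ((".mp4" : String) == String.ofList x) = false := beq_eq_false_iff_ne.mpr (fun h => h13 (by have := congrArg String.toList h; simpa using this.symm))
  have b14 : ((".mov" : String) == String.ofList x) = false := beq_eq_false_iff_ne.mpr (fun h => h14 (by have := congrArg String.toList h; simpa using this.symm))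
  have b15 : ((".avi" : String) == String.ofList x) = false := beq_eq_false_iff_ne.mpr (fun h => h15 (by have := congrArg String.toList h; simpa using this.symm))
  have b16 : ((".wmv" : String) == String.ofList x) = false := beq_eq_false_iff_ne.mpr (fun h => h16 (by have := congrArg String.toList h; simpa using this.symm))
  have b17 : ((".mkv" : String) == String.ofList x) = false := beq_eq_false_iff_ne.mpr (fun h => h17 (by have := congrArg String.toList h; simpa using this.symm))
  simp only [PySem.Dict.get?, extCategory, List.find?, b1, b2, b3, b4, b5, b6, b7, b8, b9, b10, b11, b12, b13, b14, b15, b16, b17, Option.map]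
  simp_all

-- ===== VERDICT (by name: the statement is the Claim_ definition above) =====
theorem get_file_type_py_spec : Claim_equal_get_file_type_py := by
  intro name _
  unfold Spec_get_file_type_py
  rw [alt_eq]
  unfold get_file_type_py
  dsimp only
  have key : ∀ (q : List Char), '.' ∉ q →
      PySem.Chars.endswith (PySem.Chars.lower name.toList) ('.' :: q) =
      decide (extChars (PySem.Chars.lower name.toList) = '.' :: q) :=
    fun q hq => endswith_eq_decide _ q hq
  simp only [rawExts, photoExts, videoExts, List.any_cons, List.any_nil, Bool.or_false,
    PySem.Str.endswith_eq, PySem.Str.toList_lower]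
  rw [show PySem.Chars.endswith (PySem.Chars.lower name.toList) ".raw".toList = decide (extChars (PySem.Chars.lower name.toList) = ".raw".toList) from key ['r','a','w'] (by decide),
      show PySem.Chars.endswith (PySem.Chars.lower name.toList) ".arw".toList = decide (extChars (PySem.Chars.lower name.toList) = ".arw".toList) from key ['a','r','w'] (by decide),
      show PySem.Chars.endswith (PySem.Chars.lower name.toList) ".cr2".toList = decide (extChars (PySem.Chars.lower name.toList) = ".cr2".toList) from key ['c','r','2'] (by decide),
      show PySem.Chars.endswith (PySem.Chars.lower name.toList) ".nef".toList = decide (extChars (PySem.Chars.lower name.toList) = ".nef".toList) from key ['n','e','f'] (by decide),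
      show PySem.Chars.endswith (PySem.Chars.lower name.toList) ".dng".toList = decide (extChars (PySem.Chars.lower name.toList) = ".dng".toList) from key ['d','n','g'] (by decide),
      show PySem.Chars.endswith (PySem.Chars.lower name.toList) ".jpg".toList = decide (extChars (PySem.Chars.lower name.toList) = ".jpg".toList) from key ['j','p','g'] (by decide),
      show PySem.Chars.endswith (PySem.Chars.lower name.toList) ".jpeg".toList = decide (extChars (PySem.Chars.lower name.toList) = ".jpeg".toList) from key ['j','p','e','g'] (by decide),
      show PySem.Chars.endswith (PySem.Chars.lower name.toList) ".png".toList = decide (extChars (PySem.Chars.lower name.toList) = ".png".toList) from key ['p','n','g'] (by decide),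
      show PySem.Chars.endswith (PySem.Chars.lower name.toList) ".gif".toList = decide (extChars (PySem.Chars.lower name.toList) = ".gif".toList) from key ['g','i','f'] (by decide),
      show PySem.Chars.endswith (PySem.Chars.lower name.toList) ".bmp".toList = decide (extChars (PySem.Chars.lower name.toList) = ".bmp".toList) from key ['b','m','p'] (by decide),
      show PySem.Chars.endswith (PySem.Chars.lower name.toList) ".tiff".toList = decide (extChars (PySem.Chars.lower name.toList) = ".tiff".toList) from key ['t','i','f','f'] (by decide),
      show PySem.Chars.endswith (PySem.Chars.lower name.toList) ".tif".toList = decide (extChars (PySem.Chars.lower name.toList) = ".tif".toList) from key ['t','i','f'] (by decide),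
      show PySem.Chars.endswith (PySem.Chars.lower name.toList) ".mp4".toList = decide (extChars (PySem.Chars.lower name.toList) = ".mp4".toList) from key ['m','p','4'] (by decide),
      show PySem.Chars.endswith (PySem.Chars.lower name.toList) ".mov".toList = decide (extChars (PySem.Chars.lower name.toList) = ".mov".toList) from key ['m','o','v'] (by decide),
      show PySem.Chars.endswith (PySem.Chars.lower name.toList) ".avi".toList = decide (extChars (PySem.Chars.lower name.toList) = ".avi".toList) from key ['a','v','i'] (by decide),
      show PySem.Chars.endswith (PySem.Chars.lower name.toList) ".wmv".toList = decide (extChars (PySem.Chars.lower name.toList) = ".wmv".toList) from key ['w','m','v'] (by decide),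
      show PySem.Chars.endswith (PySem.Chars.lower name.toList) ".mkv".toList = decide (extChars (PySem.Chars.lower name.toList) = ".mkv".toList) from key ['m','k','v'] (by decide)]
  simp only [Bool.or_eq_true, decide_eq_true_eq]
  exact table _ _
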